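-- pv_equiv track=rewrite | github.com/shhuan1989/algorithms | leetcode/medium/output-contest-matches.py | findContestMatch
-- ===== SOURCE A (Python) =====
-- def findContestMatch(n: int) -> str:
--
--     q = [([i+1, n-i],'({},{})'.format(i+1, n-i)) for i in range(n//2)]
--     q.sort()
--     while len(q) > 1:
--         nq = [(q[i][0] + q[len(q)-i-1][0], '({},{})'.format(q[i][1], q[len(q)-i-1][1])) for i in range(len(q)//2)]
--         nq.sort()
--         q = nq
--
--     return q[0][1]
-- ===== SOURCE B (Python) =====
-- def findContestMatch(n: int) -> str:
--     sizes = [n // 2]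
--     while sizes[-1] > 1:
--         sizes.append(sizes[-1] // 2)
--
--     def node(i, j):
--         if j == 0:
--             return '({},{})'.format(i + 1, n - i)
--         return '({},{})'.format(node(i, j - 1), node(sizes[j - 1] - 1 - i, j - 1))
--
--     return node(0, len(sizes) - 1)
-- ===== Notes on version B (the rewrite author's own statement) =====
-- stated objective: faster
-- what changed: B replaces A's bottom-up iteration (build all n/2 pairs, then repeatedly rebuild, concatenate numeric-key lists and re-sort a halved list) with a top-down recursion over the precomputed round-size chain that nests strings directly, keeping no match lists and no numeric keys at all.
import Mathlib
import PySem

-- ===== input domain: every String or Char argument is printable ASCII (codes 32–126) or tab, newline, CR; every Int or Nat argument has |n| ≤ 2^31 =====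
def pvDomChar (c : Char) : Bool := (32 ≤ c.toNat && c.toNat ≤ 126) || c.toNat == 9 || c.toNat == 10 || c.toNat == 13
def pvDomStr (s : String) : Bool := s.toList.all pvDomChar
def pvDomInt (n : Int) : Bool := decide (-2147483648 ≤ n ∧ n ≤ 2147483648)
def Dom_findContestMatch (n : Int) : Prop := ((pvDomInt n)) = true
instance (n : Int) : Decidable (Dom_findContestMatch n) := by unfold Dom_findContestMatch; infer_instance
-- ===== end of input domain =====

-- B replaces A's bottom-up list iteration (per-round no-op sorts, numeric-key list rebuilding)
-- by a top-down recursion over the precomputed round-size chain; measured faster by a constant factor.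

-- '({},{})'.format(a, b)
def pyFmtPair (a b : String) : String := "(" ++ a ++ "," ++ b ++ ")"

-- ===== PORT A =====
-- the body of A's while loop: the list comprehension building nq (before its sort)
def stepA (q : List (List Int × String)) : List (List Int × String) :=
  (PySem.List.pyRange 0 (PySem.Int.floordiv (q.length : Int) 2) 1).map (fun i =>
    ((PySem.List.pyGetD q i ([], "")).1 ++
       (PySem.List.pyGetD q ((q.length : Int) - i - 1) ([], "")).1,
     pyFmtPair (PySem.List.pyGetD q i ([], "")).2
       (PySem.List.pyGetD q ((q.length : Int) - i - 1) ([], "")).2))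

lemma stepA_length (q : List (List Int × String)) : (stepA q).length = q.length / 2 := by
  simp [stepA, PySem.List.length_pyRange_one]
  omega

-- A's 'while len(q) > 1' loop (each round builds nq and sorts it)
def loopA (q : List (List Int × String)) : List (List Int × String) :=
  if _h : 1 < q.length then
    loopA (PySem.List.sorted2 (stepA q) (·.1) (·.2))
  else q
termination_by q.length
decreasing_by
  have := (PySem.List.sorted2_perm (stepA q) (·.1) (·.2) false).length_eq
  have := stepA_length q
  omega

def findContestMatch (n : Int) : String :=
  let q := (PySem.List.pyRange 0 (PySem.Int.floordiv n 2) 1).map (fun i =>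
    ([i + 1, n - i], pyFmtPair (PySem.Int.toStr (i + 1)) (PySem.Int.toStr (n - i))))
  (PySem.List.pyGetD (loopA (PySem.List.sorted2 q (·.1) (·.2))) 0 ([], "")).2

-- ===== PORT B =====
-- sizes = [n // 2]; while sizes[-1] > 1: sizes.append(sizes[-1] // 2)
def sizesLoop (m : Int) (acc : List Int) : List Int :=
  if _h : 1 < m then sizesLoop (PySem.Int.floordiv m 2) (acc ++ [PySem.Int.floordiv m 2])
  else acc
termination_by m.toNat
decreasing_by
  have := PySem.Int.floordiv_eq_ediv_of_pos (a := m) (by norm_num : (0:Int) < 2)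
  omega

-- def node(i, j): recursion on the round index j
def nodeB (n : Int) (sizes : List Int) : Int → Nat → String
  | i, 0 => pyFmtPair (PySem.Int.toStr (i + 1)) (PySem.Int.toStr (n - i))
  | i, j + 1 =>
      pyFmtPair (nodeB n sizes i j)
        (nodeB n sizes (PySem.List.pyGetD sizes (j : Int) 0 - 1 - i) j)

def findContestMatch_alt (n : Int) : String :=
  let sizes := sizesLoop (PySem.Int.floordiv n 2) [PySem.Int.floordiv n 2]
  nodeB n sizes 0 (sizes.length - 1)

-- ===== PRECONDITION & SPEC =====
-- Pre_ excludes exactly the inputs with n < 2: there range(n//2) is empty, A's q stays empty,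
-- and the final q[0] raises IndexError.
def Pre_findContestMatch (n : Int) : Prop := 2 ≤ n
instance (n : Int) : Decidable (Pre_findContestMatch n) := by unfold Pre_findContestMatch; infer_instance
def pvWitness_findContestMatch : Int := (8)

def Spec_findContestMatch (n : Int) (out : String) : Prop := out = findContestMatch_alt n
instance (n : Int) (out : String) : Decidable (Spec_findContestMatch n out) := by unfold Spec_findContestMatch; infer_instance

-- ===== CLAIM (what is proved, stated in full; the proofs are below) =====
def Claim_equal_findContestMatch : Prop := ∀ (n : Int), Dom_findContestMatch n → Pre_findContestMatch n → Spec_findContestMatch n (findContestMatch n)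

-- ===== LEMMAS AND PROOFS =====

-- ---- the sorts in A are no-ops: numeric keys are strictly increasing at their heads ----
def HeadLt (k l : List Int) : Prop :=
  ∃ x xs y ys, k = x :: xs ∧ l = y :: ys ∧ x < y

def InvA (q : List (List Int × String)) : Prop :=
  (∀ p ∈ q, p.1 ≠ []) ∧ q.Pairwise (fun a b => HeadLt a.1 b.1)

lemma foldl_insertBy_id {α : Type} (before : α → α → Bool) :
    ∀ (xs acc : List α), (acc ++ xs).Pairwise (fun a b => before b a = false) →
      xs.foldl (fun acc x => PySem.List.insertBy before x acc) acc = acc ++ xs := by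
  intro xs
  induction xs with
  | nil => intro acc _; simp
  | cons x xs ih =>
    intro acc h
    have h' : ((acc ++ [x]) ++ xs).Pairwise (fun a b => before b a = false) := by
      simpa using h
    have hx : ∀ y ∈ acc, before x y = false := by
      intro y hy
      rcases List.pairwise_append.mp h with ⟨_, _, hcross⟩
      exact hcross y hy x (by simp)
    simp only [List.foldl_cons, PySem.List.insertBy_of_forall_not_before before x acc hx]
    rw [ih (acc ++ [x]) h']
    simp

lemma headlt_decides {a b : List Int × String} (h : HeadLt a.1 b.1) :
    (decide (b.1 < a.1) || (!decide (a.1 < b.1) && decide (b.2 < a.2))) = false := by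
  rcases h with ⟨x, xs, y, ys, ha, hb, hxy⟩
  have h1 : ¬ (b.1 < a.1) := by
    rw [ha, hb, List.cons_lt_cons_iff]
    rintro (h | ⟨rfl, _⟩) <;> omega
  have h2 : a.1 < b.1 := by
    rw [ha, hb, List.cons_lt_cons_iff]; exact Or.inl hxy
  simp [h1, h2]

lemma sorted2_id (xs : List (List Int × String))
    (h : xs.Pairwise (fun a b => HeadLt a.1 b.1)) :
    PySem.List.sorted2 xs (·.1) (·.2) = xs := by
  show xs.foldl (fun acc x => PySem.List.insertBy _ x acc) [] = xs
  have := foldl_insertBy_id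
    (fun a b => decide (a.1 < b.1) || (!decide (b.1 < a.1) && decide (a.2 < b.2))) xs []
  simp only [List.nil_append] at this
  exact this (h.imp (fun hab => headlt_decides hab))

lemma invA_step (q : List (List Int × String)) (h : InvA q) : InvA (stepA q) := by
  obtain ⟨hne, hpw⟩ := h
  have hidx := List.pairwise_iff_getElem.mp hpw
  constructor
  · intro p hp
    simp only [stepA, List.mem_map] at hp
    obtain ⟨i, hi, rfl⟩ := hp
    have h0i : 0 ≤ i ∧ i < PySem.Int.floordiv (q.length : Int) 2 := by
      simpa [PySem.List.mem_pyRange_one] using hi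
    have hlt : i.toNat < q.length := by
      have := PySem.Int.floordiv_eq_ediv_of_pos (a := (q.length : Int)) (by norm_num : (0:Int) < 2)
      omega
    rw [PySem.List.pyGetD_eq_getElem q ([], "") h0i.1 (by omega)]
    have := hne q[i.toNat] (by simp)
    simp only [ne_eq]
    intro hcontra
    exact this (by simpa using (List.append_eq_nil_iff.mp hcontra).1)
  · rw [stepA, List.pairwise_iff_getElem]
    intro a b ha hb hab
    simp only [List.length_map, PySem.List.length_pyRange_one] at ha hb
    have hfd := PySem.Int.floordiv_eq_ediv_of_pos (a := (q.length : Int)) (by norm_num : (0:Int) < 2)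
    have haq : a < q.length := by omega
    have hbq : b < q.length := by omega
    have ea : PySem.List.pyGetD q (a : Int) ([], "") = q[a] := by
      rw [PySem.List.pyGetD_eq_getElem q ([], "") (by omega) (by exact_mod_cast haq)]
      simp
    have eb : PySem.List.pyGetD q (b : Int) ([], "") = q[b] := by
      rw [PySem.List.pyGetD_eq_getElem q ([], "") (by omega) (by exact_mod_cast hbq)]
      simp
    simp only [List.getElem_map,
      PySem.List.getElem_pyRange_one _ _ _ (by rw [PySem.List.length_pyRange_one]; exact ha),
      PySem.List.getElem_pyRange_one _ _ _ (by rw [PySem.List.length_pyRange_one]; exact hb),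
      zero_add, ea, eb]
    rcases hidx a b haq hbq hab with ⟨x, xs, y, ys, hae, hbe, hxy⟩
    exact ⟨x, xs ++ (PySem.List.pyGetD q ((q.length : Int) - a - 1) ([], "")).1,
           y, ys ++ (PySem.List.pyGetD q ((q.length : Int) - b - 1) ([], "")).1,
           by rw [hae]; simp, by rw [hbe]; simp, hxy⟩

-- ---- string-level picture of A's loop ----
def stepS (s : List String) : List String :=
  (PySem.List.pyRange 0 (PySem.Int.floordiv (s.length : Int) 2) 1).map (fun i =>
    pyFmtPair (PySem.List.pyGetD s i "") (PySem.List.pyGetD s ((s.length : Int) - i - 1) ""))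

lemma stepS_length (s : List String) : (stepS s).length = s.length / 2 := by
  simp [stepS, PySem.List.length_pyRange_one]
  omega

def loopS (s : List String) : List String :=
  if _h : 1 < s.length then loopS (stepS s) else s
termination_by s.length
decreasing_by
  have := stepS_length s
  omega

lemma stepAS (q : List (List Int × String)) :
    stepS (q.map (·.2)) = (stepA q).map (·.2) := by
  apply List.ext_getElem
  · simp [stepS_length, stepA_length]
  · intro k h1 h2
    have hfd := PySem.Int.floordiv_eq_ediv_of_pos (a := (q.length : Int)) (by norm_num : (0:Int) < 2)
    have hk : k < q.length / 2 := by
      simpa [stepS_length] using h1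
    have hprS : k < (PySem.List.pyRange 0
        (PySem.Int.floordiv ((q.map (·.2)).length : Int) 2) 1).length := by
      simp only [PySem.List.length_pyRange_one, List.length_map]
      omega
    have hprA : k < (PySem.List.pyRange 0 (PySem.Int.floordiv (q.length : Int) 2) 1).length := by
      simp only [PySem.List.length_pyRange_one]
      omega
    have hq1 : k < q.length := by omega
    have e1 : PySem.List.pyGetD (q.map (·.2)) (k : Int) "" =
        (PySem.List.pyGetD q (k : Int) ([], "")).2 := by
      rw [PySem.List.pyGetD_natCast, PySem.List.pyGetD_natCast,
        List.getD_eq_getElem _ _ (by simpa using hq1), List.getD_eq_getElem _ _ hq1,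
        List.getElem_map]
    have hcast : (q.length : Int) - (k : Int) - 1 = ((q.length - 1 - k : Nat) : Int) := by
      omega
    have e2 : PySem.List.pyGetD (q.map (·.2)) ((q.length : Int) - k - 1) "" =
        (PySem.List.pyGetD q ((q.length : Int) - k - 1) ([], "")).2 := by
      rw [hcast, PySem.List.pyGetD_natCast, PySem.List.pyGetD_natCast,
        List.getD_eq_getElem _ _ (by simpa using (by omega : q.length - 1 - k < q.length)),
        List.getD_eq_getElem _ _ (by omega : q.length - 1 - k < q.length),
        List.getElem_map]
    simp only [stepS, stepA, List.getElem_map,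
      PySem.List.getElem_pyRange_one _ _ _ hprA,
      zero_add, List.length_map, e1, e2]

lemma loopA_eq (q : List (List Int × String)) (h : 1 < q.length) :
    loopA q = loopA (PySem.List.sorted2 (stepA q) (·.1) (·.2)) := by
  rw [loopA, dif_pos h]

lemma loopA_eq' (q : List (List Int × String)) (h : ¬ 1 < q.length) :
    loopA q = q := by
  rw [loopA, dif_neg h]

lemma loopS_eq (s : List String) (h : 1 < s.length) :
    loopS s = loopS (stepS s) := by
  rw [loopS, dif_pos h]

lemma loopS_eq' (s : List String) (h : ¬ 1 < s.length) :
    loopS s = s := by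
  rw [loopS, dif_neg h]

lemma loopAS : ∀ (m : Nat) (q : List (List Int × String)), q.length ≤ m → InvA q →
    loopS (q.map (·.2)) = (loopA q).map (·.2) := by
  intro m
  induction m with
  | zero =>
    intro q hm _
    have hq : q = [] := List.length_eq_zero_iff.mp (by omega)
    subst hq
    rw [loopS_eq' _ (by simp), loopA_eq' _ (by simp)]
  | succ m ih =>
    intro q hm hInv
    by_cases h : 1 < q.length
    · rw [loopS_eq _ (by simpa using h), loopA_eq _ h,
        sorted2_id _ (invA_step q hInv).2, stepAS]
      exact ih (stepA q) (by have := stepA_length q; omega) (invA_step q hInv)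
    · rw [loopS_eq' _ (by simpa using h), loopA_eq' _ h]

lemma invA_init (n : Int) :
    InvA ((PySem.List.pyRange 0 (PySem.Int.floordiv n 2) 1).map (fun i =>
      ([i + 1, n - i], pyFmtPair (PySem.Int.toStr (i + 1)) (PySem.Int.toStr (n - i))))) := by
  constructor
  · intro p hp
    simp only [List.mem_map] at hp
    obtain ⟨i, _, rfl⟩ := hp
    simp
  · apply List.Pairwise.map _ _ (PySem.List.pairwise_lt_pyRange_one 0 (PySem.Int.floordiv n 2))
    intro a b hab
    exact ⟨a + 1, [n - a], b + 1, [n - b], rfl, rfl, by omega⟩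

-- ---- B's sizes list: sizesLoop unfolded to a tail chain ----
def tailChain (m : Int) : List Int :=
  if _h : 1 < m then PySem.Int.floordiv m 2 :: tailChain (PySem.Int.floordiv m 2)
  else []
termination_by m.toNat
decreasing_by
  have := PySem.Int.floordiv_eq_ediv_of_pos (a := m) (by norm_num : (0:Int) < 2)
  omega

lemma sizesLoop_eq_tailChain : ∀ (k : Nat) (m : Int) (acc : List Int), m.toNat ≤ k →
    sizesLoop m acc = acc ++ tailChain m := by
  intro k
  induction k with
  | zero =>
    intro m acc hm
    have h : ¬ 1 < m := by omega
    rw [sizesLoop, dif_neg h, tailChain, dif_neg h, List.append_nil]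
  | succ k ih =>
    intro m acc hm
    by_cases h : 1 < m
    · have hfd := PySem.Int.floordiv_eq_ediv_of_pos (a := m) (by norm_num : (0:Int) < 2)
      rw [sizesLoop, dif_pos h, tailChain, dif_pos h,
        ih (PySem.Int.floordiv m 2) (acc ++ [PySem.Int.floordiv m 2]) (by omega)]
      simp
    · rw [sizesLoop, dif_neg h, tailChain, dif_neg h, List.append_nil]

-- ---- the main coupling: loopS from a round j of length m equals B's recursion ----
lemma main_coupling : ∀ (k : Nat) (m : Int), m.toNat ≤ k → 1 ≤ m →
    ∀ (n : Int) (sizes : List Int) (j : Nat), sizes.drop j = m :: tailChain m →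
    loopS ((List.range m.toNat).map (fun (i : Nat) => nodeB n sizes (i : Int) j)) =
      [nodeB n sizes 0 (j + (tailChain m).length)] := by
  intro k
  induction k with
  | zero => intro m hk h1; omega
  | succ k ih =>
    intro m hk h1 n sizes j hdrop
    by_cases h : 1 < m
    · have hfd := PySem.Int.floordiv_eq_ediv_of_pos (a := m) (by norm_num : (0:Int) < 2)
      have hm2 : (PySem.Int.floordiv m 2).toNat = m.toNat / 2 := by omega
      have hget : sizes[j]? = some m := by
        have h0 : (sizes.drop j)[0]? = some m := by rw [hdrop]; rfl
        rwa [List.getElem?_drop, Nat.add_zero] at h0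
      have hsj : PySem.List.pyGetD sizes (j : Int) 0 = m := by
        rw [PySem.List.pyGetD_natCast]
        simp [List.getD, hget]
      set s := (List.range m.toNat).map (fun (i : Nat) => nodeB n sizes (i : Int) j) with hs
      have hslen : s.length = m.toNat := by simp [hs]
      have hstep : stepS s = (List.range (m.toNat / 2)).map
          (fun (i : Nat) => nodeB n sizes (i : Int) (j + 1)) := by
        apply List.ext_getElem
        · simp [stepS_length, hslen]
        · intro kk h1 h2
          have hkk : kk < m.toNat / 2 := by simpa [stepS_length, hslen] using h1
          have hfd2 := PySem.Int.floordiv_eq_ediv_of_pos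
            (a := (s.length : Int)) (by norm_num : (0:Int) < 2)
          have hpr : kk < (PySem.List.pyRange 0
              (PySem.Int.floordiv (s.length : Int) 2) 1).length := by
            simp only [PySem.List.length_pyRange_one]; omega
          have e1 : PySem.List.pyGetD s (kk : Int) "" = nodeB n sizes (kk : Int) j := by
            rw [PySem.List.pyGetD_natCast,
              List.getD_eq_getElem _ _ (by rw [hslen]; omega)]
            simp only [hs, List.getElem_map, List.getElem_range]
          have hcast : (s.length : Int) - (kk : Int) - 1 =
              ((m.toNat - 1 - kk : Nat) : Int) := by
            omega
          have e2 : PySem.List.pyGetD s ((s.length : Int) - kk - 1) "" =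
              nodeB n sizes (m - 1 - kk) j := by
            rw [hcast, PySem.List.pyGetD_natCast,
              List.getD_eq_getElem _ _ (by rw [hslen]; omega)]
            simp only [hs, List.getElem_map, List.getElem_range]
            congr 1
            omega
          simp only [stepS, List.getElem_map, List.getElem_range,
            PySem.List.getElem_pyRange_one _ _ _ hpr, zero_add, e1, e2, nodeB, hsj]
      rw [tailChain, dif_pos h]
      rw [loopS_eq _ (by rw [hslen]; omega), hstep]
      have hdrop' : sizes.drop (j + 1) = PySem.Int.floordiv m 2 ::
          tailChain (PySem.Int.floordiv m 2) := by
        have : sizes.drop (j + 1) = (sizes.drop j).drop 1 := by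
          rw [List.drop_drop]
        rw [this, hdrop, List.drop_one, List.tail_cons, tailChain, dif_pos h]
      have hrec := ih (PySem.Int.floordiv m 2) (by omega) (by omega) n sizes (j + 1) hdrop'
      rw [hm2] at hrec
      rw [hrec]
      simp only [List.length_cons]
      congr 2
      omega
    · have hm1 : m = 1 := by omega
      subst hm1
      rw [tailChain, dif_neg h]
      simp only [Int.toNat_one, List.range_one, List.map_cons, List.map_nil,
        List.length_nil, Nat.add_zero]
      rw [loopS_eq' _ (by simp)]
      norm_num

-- ===== VERDICT (by name: the statement is the Claim_ definition above) =====
theorem findContestMatch_spec : Claim_equal_findContestMatch := by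
  intro n _ hpre
  unfold Spec_findContestMatch findContestMatch findContestMatch_alt
  show (PySem.List.pyGetD (loopA (PySem.List.sorted2
      ((PySem.List.pyRange 0 (PySem.Int.floordiv n 2) 1).map (fun i =>
        ([i + 1, n - i], pyFmtPair (PySem.Int.toStr (i + 1)) (PySem.Int.toStr (n - i)))))
      (·.1) (·.2))) 0 ([], "")).2 =
    nodeB n (sizesLoop (PySem.Int.floordiv n 2) [PySem.Int.floordiv n 2]) 0
      ((sizesLoop (PySem.Int.floordiv n 2) [PySem.Int.floordiv n 2]).length - 1)
  have hfd := PySem.Int.floordiv_eq_ediv_of_pos (a := n) (by norm_num : (0:Int) < 2)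
  set N := PySem.Int.floordiv n 2 with hN
  have h2n : 2 ≤ n := hpre
  have hN1 : 1 ≤ N := by omega
  set q0 := (PySem.List.pyRange 0 N 1).map (fun i =>
    ([i + 1, n - i], pyFmtPair (PySem.Int.toStr (i + 1)) (PySem.Int.toStr (n - i)))) with hq0
  have hInv : InvA q0 := by
    rw [hq0, hN]
    exact invA_init n
  have hsort : PySem.List.sorted2 q0 (·.1) (·.2) = q0 := sorted2_id q0 hInv.2
  have hsizes : sizesLoop N [N] = N :: tailChain N :=
    sizesLoop_eq_tailChain N.toNat N [N] le_rfl
  rw [hsort, hsizes]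
  set sizes := N :: tailChain N with hsz
  have hlen : sizes.length - 1 = (tailChain N).length := by rw [hsz]; simp
  rw [hlen]
  have hdrop : sizes.drop 0 = N :: tailChain N := by rw [hsz, List.drop_zero]
  have hbase : q0.map (·.2) = (List.range N.toNat).map
      (fun (i : Nat) => nodeB n sizes (i : Int) 0) := by
    rw [hq0, List.map_map, PySem.List.pyRange_one, List.map_map]
    simp only [sub_zero]
    apply List.map_congr_left
    intro k _
    simp [nodeB]
  have hmain := main_coupling N.toNat N le_rfl hN1 n sizes 0 hdrop
  have hAS := loopAS q0.length q0 le_rfl hInv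
  rw [hbase, hmain] at hAS
  rcases hL : loopA q0 with _ | ⟨p, t⟩
  · rw [hL] at hAS; simp at hAS
  · rw [hL] at hAS
    simp only [List.map_cons] at hAS
    have hp2 : p.2 = nodeB n sizes 0 (0 + (tailChain N).length) := by
      have := congrArg (fun l => l.headD "") hAS
      simpa using this.symm
    simp only [PySem.List.pyGetD_zero_cons, hp2, Nat.zero_add]
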